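-- pv_equiv track=rewrite | github.com/PawelBdev/Studia-AiP | ZAJECIA/zestaw_8/z8_5.py | zwroc_nowy_napis
-- ===== SOURCE A (Python) =====
-- def zwroc_nowy_napis(napis):
--     nowy_napis = ''
--
--     for znak in napis:
--         if znak.isupper():
--             nowy_napis += znak * 3
--         else:
--             nowy_napis += znak
--     return nowy_napis
-- ===== SOURCE B (Python) =====
-- def zwroc_nowy_napis(napis):
--     table = {ord(c): c * 3 for c in set(napis) if c.isupper()}
--     return napis.translate(table)
-- ===== Notes on version B (the rewrite author's own statement) =====
-- stated objective: faster
-- what changed: Replaces the character-by-character string-accumulation loop with a precomputed translation table over the distinct uppercase characters present, applied in a single str.translate pass.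
import Mathlib
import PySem

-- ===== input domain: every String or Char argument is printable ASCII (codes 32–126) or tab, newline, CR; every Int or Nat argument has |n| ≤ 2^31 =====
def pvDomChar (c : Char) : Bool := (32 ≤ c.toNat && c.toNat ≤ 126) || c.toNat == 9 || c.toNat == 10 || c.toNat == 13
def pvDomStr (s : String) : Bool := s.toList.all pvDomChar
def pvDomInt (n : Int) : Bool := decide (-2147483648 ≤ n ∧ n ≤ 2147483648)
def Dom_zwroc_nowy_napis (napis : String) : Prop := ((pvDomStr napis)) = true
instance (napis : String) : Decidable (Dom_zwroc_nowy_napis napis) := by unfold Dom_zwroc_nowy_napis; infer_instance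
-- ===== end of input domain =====

-- B precomputes a translation table over the distinct uppercase characters present and applies it in one translate pass, instead of A's character-by-character string accumulation.


-- ===== PORT A =====
-- for znak in napis: nowy_napis += znak*3 if znak.isupper() else znak
def zwroc_nowy_napis (napis : String) : String :=
  String.ofList (napis.toList.foldl
    (fun acc znak => acc ++ (if PySem.Chars.isupper znak then [znak, znak, znak] else [znak]))
    [])

-- ===== PORT B =====
-- table = {c: c*3 for c in set(napis) if c.isupper()}  (keyed by the Char itself; ord is a bijection)
def pvTable (s : List Char) : PySem.Dict Char String :=
  (PySem.Set.ofList s).foldl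
    (fun d c => if PySem.Chars.isupper c then d.insert c (String.ofList [c, c, c]) else d)
    PySem.Dict.empty

-- napis.translate(table): each char is replaced by its table entry if present, else kept
def zwroc_nowy_napis_alt (napis : String) : String :=
  String.ofList (napis.toList.flatMap (fun c =>
    match (pvTable napis.toList).get? c with
    | some r => r.toList
    | none   => [c]))

-- ===== PRECONDITION & SPEC =====
def Spec_zwroc_nowy_napis (napis : String) (out : String) : Prop := out = zwroc_nowy_napis_alt napis
instance (napis : String) (out : String) : Decidable (Spec_zwroc_nowy_napis napis out) := by unfold Spec_zwroc_nowy_napis; infer_instance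

-- ===== CLAIM (what is proved, stated in full; the proofs are below) =====
def Claim_equal_zwroc_nowy_napis : Prop := ∀ (napis : String), Dom_zwroc_nowy_napis napis → Spec_zwroc_nowy_napis napis (zwroc_nowy_napis napis)

-- ===== LEMMAS AND PROOFS =====

-- what looking a character up in the fold-built table yields
theorem pvTable_foldl_get? (s : List Char) (d : PySem.Dict Char String) (c : Char) :
    (s.foldl (fun d c => if PySem.Chars.isupper c then d.insert c (String.ofList [c, c, c]) else d) d).get? c
      = if c ∈ s ∧ PySem.Chars.isupper c then some (String.ofList [c, c, c]) else d.get? c := by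
  induction s generalizing d with
  | nil => simp
  | cons a t ih =>
    simp only [List.foldl_cons]
    by_cases hu : PySem.Chars.isupper a
    · rw [if_pos hu, ih]
      by_cases hac : c = a
      · subst hac; simp [hu, PySem.Dict.get?_insert_self]
      · rw [PySem.Dict.get?_insert_of_ne d _ hac]
        simp [List.mem_cons, hac]
    · rw [if_neg hu, ih]
      by_cases hac : c = a
      · subst hac; simp [hu]
      · simp [List.mem_cons, hac]

theorem pvTable_get? (s : List Char) (c : Char) (hc : c ∈ s) :
    (pvTable s).get? c
      = if PySem.Chars.isupper c then some (String.ofList [c, c, c]) else none := by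
  unfold pvTable
  rw [pvTable_foldl_get?]
  have hmem : c ∈ PySem.Set.ofList s := by simpa [PySem.Set.mem_ofList] using hc
  by_cases hu : PySem.Chars.isupper c <;> simp [hu, hmem, PySem.Dict.empty, PySem.Dict.get?]

theorem pvFlatMap_eq (s l : List Char) (hsub : ∀ c ∈ l, c ∈ s) :
    l.flatMap (fun c =>
      match (pvTable s).get? c with
      | some r => r.toList
      | none   => [c])
      = l.flatMap (fun c => if PySem.Chars.isupper c then [c, c, c] else [c]) := by
  induction l with
  | nil => rfl
  | cons a t ih =>
    simp only [List.flatMap_cons]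
    rw [ih (fun c hc => hsub c (List.mem_cons_of_mem _ hc)),
        pvTable_get? s a (hsub a (List.mem_cons_self))]
    by_cases hu : PySem.Chars.isupper a <;> simp [hu]

-- ===== VERDICT (by name: the statement is the Claim_ definition above) =====
theorem zwroc_nowy_napis_spec : Claim_equal_zwroc_nowy_napis := by
  intro napis _
  unfold Spec_zwroc_nowy_napis zwroc_nowy_napis zwroc_nowy_napis_alt
  rw [PySem.List.foldl_append_eq_flatMap, pvFlatMap_eq napis.toList napis.toList (fun _ h => h)]
  simp
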